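-- pv_equiv track=rewrite | github.com/neddul/advent-of-code | 2023/1312/pointofincidence.py | mirror_points
-- ===== SOURCE A (Python) =====
-- def rotate(matrix):
--     new_map = []
--     for i in range(len(matrix[0])):
--         new_row = []
--         for j in range(len(matrix)):
--             new_row.append(matrix[-1-j][i])
--         new_map.append(new_row)
--     return new_map
--
-- def mirror(matrix, error_con):
--     for i in range(1, len(matrix)):
--         above = matrix[:i][::-1] #Reverses the strings instead of [1, 2, 3] you get [3, 2, 1]
--         below = matrix[i:]
--         errors = 0
--         for above_row, below_row in zip(above, below): #Will be as long as the shortest list of strings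
--             for ac, bc in zip(above_row, below_row):
--                 if ac != bc:
--                     errors += 1
--         if errors == error_con:
--             return i
--     return 0
--
-- def mirror_points(data, error_con):
--     total_points = 0
--     for d in data:
--         row_points = mirror(d, error_con) * 100
--         total_points += row_points
--         d = rotate(d)
--         col_points = mirror(d, error_con)
--         total_points+= col_points
--     return total_points
-- ===== SOURCE B (Python) =====
-- def mirror_points(data, error_con):
--     total = 0
--     for g in data:
--         n, w = len(g), len(g[0])
--         # pairwise Hamming distances between rows (p < q), built once
--         rd = [[sum(a != b for a, b in zip(g[p], g[q])) if p < q else 0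
--                for q in range(n)] for p in range(n)]
--         # pairwise Hamming distances between columns (p < q), row-major, no rotation
--         cd = [[sum(row[p] != row[q] for row in g) if p < q else 0
--                for q in range(w)] for p in range(w)]
--         total += 100 * _axis(rd, n, error_con) + _axis(cd, w, error_con)
--     return total
--
-- def _axis(dist, m, error_con):
--     for i in range(1, m):
--         if sum(dist[i - 1 - k][i + k] for k in range(min(i, m - i))) == error_con:
--             return i
--     return 0
-- ===== Notes on version B (the rewrite author's own statement) =====
-- stated objective: alternative
-- what changed: B introduces a new data structure: per grid it precomputes two pairwise Hamming-distance tables (rows x rows and, row-major with no rotated matrix, columns x columns), and the reflection-axis scan then only sums table entries instead of comparing characters per axis.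
import Mathlib
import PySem

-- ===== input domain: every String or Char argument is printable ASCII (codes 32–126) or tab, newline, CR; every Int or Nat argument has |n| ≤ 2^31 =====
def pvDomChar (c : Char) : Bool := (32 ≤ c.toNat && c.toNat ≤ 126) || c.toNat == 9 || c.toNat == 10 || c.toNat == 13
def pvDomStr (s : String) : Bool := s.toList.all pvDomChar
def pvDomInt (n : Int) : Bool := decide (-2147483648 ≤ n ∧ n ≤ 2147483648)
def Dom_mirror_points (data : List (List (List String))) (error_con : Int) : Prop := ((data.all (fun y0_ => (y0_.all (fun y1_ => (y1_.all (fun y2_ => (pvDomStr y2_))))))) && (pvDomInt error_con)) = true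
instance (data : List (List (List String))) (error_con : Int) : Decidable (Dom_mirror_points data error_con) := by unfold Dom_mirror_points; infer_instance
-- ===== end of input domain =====

-- B precomputes pairwise Hamming-distance tables between rows and between columns once
-- per grid; the axis scan then only sums table entries — no rotation, no per-axis
-- character comparisons (alternative decomposition, same cost).

-- ===== PORT A =====
-- rotate: matrix[-1-j] with 0 ≤ j < len is exactly matrix[len-1-j]; row[i] ported with
-- getD "" — exact inside Pre_ (every row at least as long as row 0, so i is in range).
def pvRotate (matrix : List (List String)) : List (List String) :=
  (List.range (matrix.headD []).length).map (fun i =>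
    (List.range matrix.length).map (fun j =>
      (matrix.getD (matrix.length - 1 - j) []).getD i ""))

-- errors of mirror's candidate axis i: matrix[:i][::-1] zipped against matrix[i:]
def pvMirrorErrs (matrix : List (List String)) (i : Nat) : Nat :=
  (((matrix.take i).reverse.zip (matrix.drop i)).map
    (fun p => (p.1.zip p.2).countP (fun q => q.1 ≠ q.2))).sum

-- the for-loop of `mirror` with its early return
def pvMirrorLoop (matrix : List (List String)) (error_con : Int) : List Nat → Int
  | [] => 0
  | i :: rest =>
      if (pvMirrorErrs matrix i : Int) = error_con then (i : Int)
      else pvMirrorLoop matrix error_con rest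

def pvMirror (matrix : List (List String)) (error_con : Int) : Int :=
  pvMirrorLoop matrix error_con (List.range' 1 (matrix.length - 1))

def mirror_points (data : List (List (List String))) (error_con : Int) : Int :=
  data.foldl (fun tot d => tot + pvMirror d error_con * 100 + pvMirror (pvRotate d) error_con) 0

-- ===== PORT B =====
-- the row-distance table rd: rd[p][q] = Hamming distance of rows p and q for p < q, else 0
def pvRdTable (g : List (List String)) : List (List Nat) :=
  (List.range g.length).map (fun p => (List.range g.length).map (fun q =>
    if p < q then ((g.getD p []).zip (g.getD q [])).countP (fun x => x.1 ≠ x.2) else 0))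

-- the column-distance table cd, computed row-major on the original grid; row[·] ported
-- with getD "" — exact inside Pre_ (p, q < width ≤ every row's length).
def pvCdTable (g : List (List String)) (w : Nat) : List (List Nat) :=
  (List.range w).map (fun p => (List.range w).map (fun q =>
    if p < q then g.countP (fun row => row.getD p "" ≠ row.getD q "") else 0))

-- the mismatch total _axis reads off the table for candidate axis i
def pvTableErrs (dist : List (List Nat)) (m i : Nat) : Nat :=
  ((List.range (min i (m - i))).map (fun k => (dist.getD (i - 1 - k) []).getD (i + k) 0)).sum

-- _axis's scan with its early return
def pvAxisLoop (dist : List (List Nat)) (m : Nat) (error_con : Int) : List Nat → Int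
  | [] => 0
  | i :: rest =>
      if (pvTableErrs dist m i : Int) = error_con then (i : Int)
      else pvAxisLoop dist m error_con rest

def mirror_points_alt (data : List (List (List String))) (error_con : Int) : Int :=
  data.foldl (fun tot g =>
    tot + 100 * pvAxisLoop (pvRdTable g) g.length error_con (List.range' 1 (g.length - 1))
        + pvAxisLoop (pvCdTable g (g.headD []).length) (g.headD []).length error_con
            (List.range' 1 ((g.headD []).length - 1))) 0

-- ===== PRECONDITION & SPEC =====
-- Pre_ excludes exactly the inputs where Python A raises IndexError in `rotate`:
-- an empty grid (matrix[0]) or a row shorter than the first row (matrix[-1-j][i]).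
def Pre_mirror_points (data : List (List (List String))) (error_con : Int) : Prop :=
  ∀ g ∈ data, g ≠ [] ∧ ∀ row ∈ g, (g.headD []).length ≤ row.length
instance (data : List (List (List String))) (error_con : Int) : Decidable (Pre_mirror_points data error_con) := by unfold Pre_mirror_points; infer_instance

def pvWitness_mirror_points : List (List (List String)) × Int := ([[["#", "."], [".", "."]]], 0)

def Spec_mirror_points (data : List (List (List String))) (error_con : Int) (out : Int) : Prop := out = mirror_points_alt data error_con
instance (data : List (List (List String))) (error_con : Int) (out : Int) : Decidable (Spec_mirror_points data error_con out) := by unfold Spec_mirror_points; infer_instance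

-- ===== CLAIM (what is proved, stated in full; the proofs are below) =====
def Claim_equal_mirror_points : Prop := ∀ (data : List (List (List String))) (error_con : Int), Dom_mirror_points data error_con → Pre_mirror_points data error_con → Spec_mirror_points data error_con (mirror_points data error_con)

-- ===== LEMMAS AND PROOFS =====

-- proof-only helper: A's column mismatches written row-major on the original grid
def pvColErrs (g : List (List String)) (w i : Nat) : Nat :=
  (g.map (fun row =>
    (List.range (min i (w - i))).countP (fun k =>
      row.getD (i - 1 - k) "" ≠ row.getD (i + k) ""))).sum

theorem pvAxisLoop_eq_mirrorLoop (dist : List (List Nat)) (m : Nat) (mat : List (List String))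
    (e : Int) (l : List Nat) (h : ∀ i ∈ l, pvTableErrs dist m i = pvMirrorErrs mat i) :
    pvAxisLoop dist m e l = pvMirrorLoop mat e l := by
  induction l with
  | nil => rfl
  | cons i rest ih =>
      simp only [pvAxisLoop, pvMirrorLoop, h i (by simp)]
      rw [ih (fun j hj => h j (by simp [hj]))]

-- reading a square range×range table
theorem table_getD (m : Nat) (f : Nat → Nat → Nat) (p q : Nat) (hp : p < m) (hq : q < m) :
    ((((List.range m).map (fun p => (List.range m).map (fun q => f p q))).getD p []).getD q 0)
      = f p q := by
  rw [List.getD_eq_getElem _ [] (by simpa using hp)]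
  simp only [List.getElem_map, List.getElem_range]
  rw [List.getD_eq_getElem _ 0 (by simpa using hq)]
  simp

-- the reversed upper slice zipped against the lower slice, written with direct indices
theorem zip_slice_eq (l : List (List String)) (i : Nat) :
    (l.take i).reverse.zip (l.drop i)
      = (List.range (min i (l.length - i))).map
          (fun k => (l.getD (i - 1 - k) [], l.getD (i + k) [])) := by
  apply List.ext_getElem
  · simp only [List.length_zip, List.length_reverse, List.length_take, List.length_drop,
      List.length_map, List.length_range]
    omega
  · intro k h1 h2
    simp only [List.length_zip, List.length_reverse, List.length_take, List.length_drop] at h1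
    have hk : k < min i (l.length - i) := by omega
    have hi : i ≤ l.length := by omega
    simp only [List.getElem_zip, List.getElem_map, List.getElem_range]
    have h3 : k < (l.take i).reverse.length := by simp; omega
    have h4 : k < (l.drop i).length := by simp; omega
    have hTlen : (l.take i).length = i := by simp; omega
    have hA : (l.take i).reverse[k]'h3 = l.getD (i - 1 - k) [] := by
      rw [List.getElem_reverse, List.getElem_take]
      simp only [hTlen]
      rw [List.getD_eq_getElem l [] (by omega)]
    have hB : (l.drop i)[k]'h4 = l.getD (i + k) [] := by
      rw [List.getElem_drop]
      rw [List.getD_eq_getElem l [] (by omega)]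
    rw [hA, hB]

-- sums over List.range as Finset sums
theorem sum_map_range {M : Type} [AddCommMonoid M] (f : Nat → M) (n : Nat) :
    ((List.range n).map f).sum = ∑ j ∈ Finset.range n, f j := by
  induction n with
  | zero => simp
  | succ n ih => rw [List.range_succ]; simp [ih, Finset.sum_range_succ]

theorem countP_range (p : Nat → Bool) (n : Nat) :
    (List.range n).countP p = ∑ j ∈ Finset.range n, (if p j then 1 else 0) := by
  induction n with
  | zero => simp
  | succ n ih =>
      rw [List.range_succ, List.countP_append, Finset.sum_range_succ, ih]
      simp [List.countP_cons]

theorem countP_zip_map {α β : Type} (f h : α → β) (l : List α) (p : β × β → Bool) :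
    ((l.map f).zip (l.map h)).countP p = l.countP (fun x => p (f x, h x)) := by
  rw [List.zip_map', List.countP_map]
  rfl

-- a list as the map of its getD over range
theorem map_eq_map_range_getD {α β : Type} (l : List α) (F : α → β) (d : α) :
    l.map F = (List.range l.length).map (fun r => F (l.getD r d)) := by
  apply List.ext_getElem
  · simp
  · intro k h1 h2
    have hk : k < l.length := by simpa using h1
    simp [List.getElem?_eq_getElem hk]

theorem countP_eq_sum_map {α : Type} (l : List α) (p : α → Bool) :
    l.countP p = (l.map (fun x => if p x then 1 else 0)).sum := by
  induction l with
  | nil => rfl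
  | cons x xs ih => simp [List.countP_cons, ih]; omega

theorem countP_getD {α : Type} (l : List α) (p : α → Bool) (d : α) :
    l.countP p = ∑ j ∈ Finset.range l.length, (if p (l.getD j d) then 1 else 0) := by
  rw [countP_eq_sum_map, map_eq_map_range_getD l _ d, sum_map_range]

-- the row table read at axis i gives A's row mismatch count
theorem tableErrs_rd (g : List (List String)) (i : Nat) (h1 : 1 ≤ i) :
    pvTableErrs (pvRdTable g) g.length i = pvMirrorErrs g i := by
  unfold pvTableErrs pvMirrorErrs pvRdTable
  rw [zip_slice_eq, List.map_map]
  refine congrArg List.sum (List.map_congr_left ?_)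
  intro k hk
  simp only [List.mem_range] at hk
  rw [table_getD g.length _ (i - 1 - k) (i + k) (by omega) (by omega)]
  rw [if_pos (by omega)]
  rfl

-- rotating then counting row mismatches equals the row-major column count
theorem mirrorErrs_rotate_eq_colErrs (g : List (List String)) (i : Nat) :
    pvMirrorErrs (pvRotate g) i = pvColErrs g (g.headD []).length i := by
  have hlen : (pvRotate g).length = (g.headD []).length := by
    simp [pvRotate]
  have hget : ∀ c, c < (g.headD []).length → (pvRotate g).getD c []
      = (List.range g.length).map
          (fun j => (g.getD (g.length - 1 - j) []).getD c "") := by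
    intro c hc
    rw [List.getD_eq_getElem (pvRotate g) [] (by rw [hlen]; omega)]
    simp [pvRotate]
  unfold pvMirrorErrs pvColErrs
  rw [zip_slice_eq, List.map_map, hlen]
  rw [map_eq_map_range_getD g _ ([] : List String)]
  rw [sum_map_range, sum_map_range]
  calc
    ∑ k ∈ Finset.range (min i ((g.headD []).length - i)),
        ((fun p : List String × List String =>
            (p.1.zip p.2).countP (fun q => decide (q.1 ≠ q.2))) ∘ fun k =>
          ((pvRotate g).getD (i - 1 - k) [], (pvRotate g).getD (i + k) []))
          k
      = ∑ k ∈ Finset.range (min i ((g.headD []).length - i)),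
          ∑ j ∈ Finset.range g.length,
            (if decide ((g.getD (g.length - 1 - j) []).getD (i - 1 - k) ""
                  ≠ (g.getD (g.length - 1 - j) []).getD (i + k) "") then 1 else 0) := by
        refine Finset.sum_congr rfl (fun k hk => ?_)
        simp only [Finset.mem_range] at hk
        simp only [Function.comp]
        rw [hget _ (by omega), hget _ (by omega), countP_zip_map, countP_range]
    _ = ∑ k ∈ Finset.range (min i ((g.headD []).length - i)),
          ∑ j ∈ Finset.range g.length,
            (if decide ((g.getD j []).getD (i - 1 - k) ""
                  ≠ (g.getD j []).getD (i + k) "") then 1 else 0) := by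
        refine Finset.sum_congr rfl (fun k _ => ?_)
        exact Finset.sum_range_reflect
          (fun j => if decide ((g.getD j []).getD (i - 1 - k) ""
              ≠ (g.getD j []).getD (i + k) "") then 1 else 0) g.length
    _ = ∑ j ∈ Finset.range g.length,
          ∑ k ∈ Finset.range (min i ((g.headD []).length - i)),
            (if decide ((g.getD j []).getD (i - 1 - k) ""
                  ≠ (g.getD j []).getD (i + k) "") then 1 else 0) := by
        exact Finset.sum_comm
    _ = ∑ j ∈ Finset.range g.length,
          (List.range (min i ((g.headD []).length - i))).countP
            (fun k => decide ((g.getD j []).getD (i - 1 - k) ""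
                ≠ (g.getD j []).getD (i + k) "")) := by
        refine Finset.sum_congr rfl (fun j _ => ?_)
        rw [countP_range]

-- the column table read at axis i gives the row-major column count
theorem tableErrs_cd (g : List (List String)) (i : Nat) (h1 : 1 ≤ i) :
    pvTableErrs (pvCdTable g (g.headD []).length) (g.headD []).length i
      = pvColErrs g (g.headD []).length i := by
  unfold pvTableErrs pvCdTable
  have hstep : (List.range (min i ((g.headD []).length - i))).map
        (fun k => ((((List.range (g.headD []).length).map (fun p =>
            (List.range (g.headD []).length).map (fun q =>
              if p < q then g.countP (fun row => row.getD p "" ≠ row.getD q "") else 0))).getD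
            (i - 1 - k) []).getD (i + k) 0))
      = (List.range (min i ((g.headD []).length - i))).map
        (fun k => g.countP (fun row => row.getD (i - 1 - k) "" ≠ row.getD (i + k) "")) := by
    refine List.map_congr_left ?_
    intro k hk
    simp only [List.mem_range] at hk
    rw [table_getD ((g.headD []).length) _ (i - 1 - k) (i + k) (by omega) (by omega)]
    rw [if_pos (by omega)]
  rw [hstep, sum_map_range]
  unfold pvColErrs
  rw [map_eq_map_range_getD g _ ([] : List String), sum_map_range]
  calc
    ∑ k ∈ Finset.range (min i ((g.headD []).length - i)),
        g.countP (fun row => decide (row.getD (i - 1 - k) "" ≠ row.getD (i + k) ""))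
      = ∑ k ∈ Finset.range (min i ((g.headD []).length - i)),
          ∑ j ∈ Finset.range g.length,
            (if decide ((g.getD j []).getD (i - 1 - k) ""
                ≠ (g.getD j []).getD (i + k) "") then 1 else 0) := by
        refine Finset.sum_congr rfl (fun k _ => ?_)
        rw [countP_getD g _ ([] : List String)]
    _ = ∑ j ∈ Finset.range g.length,
          ∑ k ∈ Finset.range (min i ((g.headD []).length - i)),
            (if decide ((g.getD j []).getD (i - 1 - k) ""
                ≠ (g.getD j []).getD (i + k) "") then 1 else 0) := Finset.sum_comm
    _ = ∑ j ∈ Finset.range g.length,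
          (List.range (min i ((g.headD []).length - i))).countP
            (fun k => decide ((g.getD j []).getD (i - 1 - k) ""
                ≠ (g.getD j []).getD (i + k) "")) := by
        refine Finset.sum_congr rfl (fun j _ => ?_)
        rw [countP_range]

-- per-grid agreement of the two folds' step values
theorem per_grid (d : List (List String)) (e : Int) :
    pvMirror d e * 100 + pvMirror (pvRotate d) e
      = 100 * pvAxisLoop (pvRdTable d) d.length e (List.range' 1 (d.length - 1))
        + pvAxisLoop (pvCdTable d (d.headD []).length) (d.headD []).length e
            (List.range' 1 ((d.headD []).length - 1)) := by
  unfold pvMirror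
  have hlen : (pvRotate d).length = (d.headD []).length := by simp [pvRotate]
  rw [hlen]
  rw [← pvAxisLoop_eq_mirrorLoop (pvRdTable d) d.length d e _
        (fun i hi => tableErrs_rd d i (by
          rcases List.mem_range'.1 hi with ⟨j, hj, rfl⟩; omega))]
  rw [← pvAxisLoop_eq_mirrorLoop (pvCdTable d (d.headD []).length) (d.headD []).length
        (pvRotate d) e _
        (fun i hi => by
          rw [mirrorErrs_rotate_eq_colErrs]
          exact tableErrs_cd d i (by
            rcases List.mem_range'.1 hi with ⟨j, hj, rfl⟩; omega))]
  ring

theorem fold_eq (data : List (List (List String))) (e : Int) (acc : Int) :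
    data.foldl (fun tot d => tot + pvMirror d e * 100 + pvMirror (pvRotate d) e) acc
      = data.foldl (fun tot g =>
          tot + 100 * pvAxisLoop (pvRdTable g) g.length e (List.range' 1 (g.length - 1))
              + pvAxisLoop (pvCdTable g (g.headD []).length) (g.headD []).length e
                  (List.range' 1 ((g.headD []).length - 1))) acc := by
  induction data generalizing acc with
  | nil => rfl
  | cons d rest ih =>
      simp only [List.foldl_cons]
      rw [show acc + pvMirror d e * 100 + pvMirror (pvRotate d) e
            = acc + 100 * pvAxisLoop (pvRdTable d) d.length e (List.range' 1 (d.length - 1))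
              + pvAxisLoop (pvCdTable d (d.headD []).length) (d.headD []).length e
                  (List.range' 1 ((d.headD []).length - 1)) by
            have := per_grid d e; omega]
      exact ih _

-- ===== VERDICT (by name: the statement is the Claim_ definition above) =====
theorem mirror_points_spec : Claim_equal_mirror_points := by
  intro data e _ _
  unfold Spec_mirror_points mirror_points mirror_points_alt
  exact fold_eq data e 0
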